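-- pv_equiv track=rewrite | github.com/thanethomson/lipsum | lipsum/utils.py | count_paragraphs
-- ===== SOURCE A (Python) =====
-- def count_paragraphs(s):
--     """Counts the number of paragraphs in the given string."""
--     last_line = ""
--     count = 0
--     for line in s.split("\n"):
--         if len(line) > 0 and (len(last_line) == 0 or last_line == "\n"):
--             count += 1
--         last_line = line
--     return count
-- ===== SOURCE B (Python) =====
-- def count_paragraphs(s):
--     """Counts the number of paragraphs in the given string."""
--     lines = s.split("\n")
--     nonempty = [len(l) > 0 for l in lines]
--     return sum(nonempty) - sum(a and b for a, b in zip(nonempty, nonempty[1:]))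
-- ===== Notes on version B (the rewrite author's own statement) =====
-- stated objective: alternative
-- what changed: Replaces A's previous-line state machine with an inclusion-exclusion formula: count of non-empty lines minus count of adjacent non-empty line pairs (zip of the emptiness list with its tail).
import Mathlib
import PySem

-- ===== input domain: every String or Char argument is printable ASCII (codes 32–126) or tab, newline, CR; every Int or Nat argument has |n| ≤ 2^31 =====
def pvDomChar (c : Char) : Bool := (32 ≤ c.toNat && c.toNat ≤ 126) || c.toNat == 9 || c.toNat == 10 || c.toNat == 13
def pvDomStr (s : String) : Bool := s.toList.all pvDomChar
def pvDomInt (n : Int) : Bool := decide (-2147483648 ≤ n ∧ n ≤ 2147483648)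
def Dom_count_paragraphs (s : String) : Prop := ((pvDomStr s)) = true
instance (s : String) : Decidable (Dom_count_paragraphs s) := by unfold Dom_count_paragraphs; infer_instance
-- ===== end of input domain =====

-- B replaces A's previous-line state machine by an inclusion–exclusion count
-- (non-empty lines minus adjacent non-empty pairs); objective: alternative.


-- ===== PORT A =====
-- s.split("\n") with the non-empty literal separator is PySem.Chars.splitOn on the code points;
-- len(line) is the piece's list length (exact for any string).
def count_paragraphs (s : String) : Int :=
  ((PySem.Chars.splitOn s.toList ['\n']).foldl
    (fun (st : List Char × Int) line =>
      (line,
        if 0 < line.length ∧ (st.1.length = 0 ∨ st.1 = ['\n'])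
        then st.2 + 1 else st.2))
    ([], 0)).2

-- ===== PORT B =====
def count_paragraphs_alt (s : String) : Int :=
  let lines := PySem.Chars.splitOn s.toList ['\n']
  let nonempty := lines.map (fun l => decide (0 < l.length))
  ((nonempty.map (fun b => if b then (1 : Int) else 0)).sum)
    - (((nonempty.zip (nonempty.drop 1)).map
        (fun p => if p.1 && p.2 then (1 : Int) else 0)).sum)

-- ===== PRECONDITION & SPEC =====
def Spec_count_paragraphs (s : String) (out : Int) : Prop := out = count_paragraphs_alt s
instance (s : String) (out : Int) : Decidable (Spec_count_paragraphs s out) := by unfold Spec_count_paragraphs; infer_instance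

-- ===== CLAIM (what is proved, stated in full; the proofs are below) =====
def Claim_equal_count_paragraphs : Prop := ∀ (s : String), Dom_count_paragraphs s → Spec_count_paragraphs s (count_paragraphs s)

-- ===== LEMMAS AND PROOFS =====

-- Common reference: number of maximal runs of `true` in a boolean list, given the previous flag.
def pvRuns (prev : Bool) : List Bool → Int
  | [] => 0
  | b :: bs => (if b && !prev then 1 else 0) + pvRuns b bs

-- pair sum with an explicit previous flag
def pvPairs (prev : Bool) : List Bool → Int
  | [] => 0
  | b :: bs => (if prev && b then 1 else 0) + pvPairs b bs

lemma pvRuns_eq_sum_sub_pairs (bs : List Bool) (prev : Bool) :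
    pvRuns prev bs =
      ((bs.map (fun b => if b then (1 : Int) else 0)).sum) - pvPairs prev bs := by
  induction bs generalizing prev with
  | nil => simp [pvRuns, pvPairs]
  | cons b bs ih =>
    simp only [pvRuns, pvPairs, List.map, List.sum_cons, ih b]
    cases b <;> cases prev <;> simp <;> try ring

lemma pvPairs_cons (cs : List Bool) : ∀ (b : Bool),
    pvPairs b cs =
      (((b :: cs).zip cs).map (fun p => if p.1 && p.2 then (1 : Int) else 0)).sum := by
  induction cs with
  | nil => intro b; simp [pvPairs]
  | cons c cs ih => intro b; simp [pvPairs, ih c]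

lemma pvPairs_false_eq_zip (bs : List Bool) :
    pvPairs false bs =
      (((bs.zip (bs.drop 1)).map (fun p => if p.1 && p.2 then (1 : Int) else 0)).sum) := by
  cases bs with
  | nil => simp [pvPairs]
  | cons b bs => simp [pvPairs, pvPairs_cons bs b]

-- the pieces of splitOn on "\n" never contain '\n'
lemma pv_go_no_nl : ∀ (fuel : Nat) (l cur : List Char) (acc : List (List Char)),
    l.length < fuel →
    (∀ p ∈ acc, ('\n' : Char) ∉ p) → ('\n' : Char) ∉ cur →
    ∀ p ∈ PySem.Chars.splitOn.go ['\n'] fuel l cur acc, ('\n' : Char) ∉ p := by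
  intro fuel
  induction fuel with
  | zero => intro l cur acc h; exact absurd h (by omega)
  | succ fuel ih =>
    intro l cur acc hlen hacc hcur
    cases l with
    | nil =>
      rw [PySem.Chars.splitOn.go]
      · intro p hp
        simp only [List.mem_reverse, List.mem_cons] at hp
        rcases hp with h | h
        · subst h; simpa using hcur
        · exact hacc p h
      · omega
    | cons c rest =>
      rw [PySem.Chars.splitOn.go]
      by_cases hpre : ['\n'].isPrefixOf (c :: rest) = true
      · simp only [hpre, if_true]
        refine ih _ _ _ (by simp at hlen ⊢; omega) ?_ (by simp)
        intro p hp
        simp only [List.mem_cons] at hp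
        rcases hp with h | h
        · subst h; simpa using hcur
        · exact hacc p h
      · simp only [hpre]
        refine ih _ _ _ (by simp at hlen ⊢; omega) hacc ?_
        have hc : c ≠ '\n' := by
          intro h; apply hpre; simp [List.isPrefixOf, h]
        simp only [List.mem_cons]
        rintro (h | h)
        · exact hc h.symm
        · exact hcur h

lemma pv_splitOn_no_nl (cs : List Char) :
    ∀ p ∈ PySem.Chars.splitOn cs ['\n'], ('\n' : Char) ∉ p := by
  unfold PySem.Chars.splitOn
  exact pv_go_no_nl (cs.length + 1) cs [] [] (by omega) (by simp) (by simp)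

-- A's fold equals the run count, as long as no line is the literal "\n"
lemma pvFoldA_eq_runs (lines : List (List Char)) :
    (∀ p ∈ lines, p ≠ ['\n']) →
    ∀ (ll : List Char) (c : Int), ll ≠ ['\n'] →
    (lines.foldl
      (fun (st : List Char × Int) line =>
        (line,
          if 0 < line.length ∧ (st.1.length = 0 ∨ st.1 = ['\n'])
          then st.2 + 1 else st.2))
      (ll, c)).2
      = c + pvRuns (decide (0 < ll.length)) (lines.map (fun l => decide (0 < l.length))) := by
  induction lines with
  | nil => intro _ ll c _; simp [pvRuns]
  | cons l rest ih =>
    intro hcl ll c hll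
    simp only [List.foldl_cons, List.map_cons, pvRuns]
    rw [ih (fun p hp => hcl p (List.mem_cons_of_mem _ hp)) l _
      (hcl l (by simp))]
    have h2' : (ll.length = 0 ∨ ll = ['\n']) ↔ ¬ 0 < ll.length := by
      constructor
      · rintro (h | h)
        · omega
        · exact absurd h hll
      · intro h; left; omega
    have hEq : (if 0 < l.length ∧ (ll.length = 0 ∨ ll = ['\n']) then c + 1 else c)
        = c + (if decide (0 < l.length) && !decide (0 < ll.length) then (1 : Int) else 0) := by
      rw [if_congr (and_congr_right (fun _ => h2')) rfl rfl]
      by_cases h1 : 0 < l.length <;> by_cases h2 : 0 < ll.length <;> simp [h1, h2]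
    rw [hEq]; ring

-- ===== VERDICT (by name: the statement is the Claim_ definition above) =====
theorem count_paragraphs_spec : Claim_equal_count_paragraphs := by
  intro s _
  unfold Spec_count_paragraphs count_paragraphs count_paragraphs_alt
  have hclean : ∀ p ∈ PySem.Chars.splitOn s.toList ['\n'], p ≠ ['\n'] := by
    intro p hp h
    exact pv_splitOn_no_nl s.toList p hp (h ▸ by simp)
  rw [pvFoldA_eq_runs _ hclean [] 0 (by simp)]
  simp only [List.length_nil, Nat.lt_irrefl, decide_false, zero_add]
  rw [pvRuns_eq_sum_sub_pairs, pvPairs_false_eq_zip]
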